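-- pv_equiv track=rewrite | github.com/alexiatwerkgroup/alexiatwerkgroup-clean | RECONSTRUIR_MODELOS_ESTUDIOS.py | patch_old_links
-- ===== SOURCE A (Python) =====
-- SERVER_PLAYLIST_INDEX = "playlist/index.html"
--
-- def patch_old_links(text: str) -> str:
--     old_paths = [
--         "twerk-video-playlist.html",
--         "playlist.html",
--         "playlist/index.html",
--         "/playlist/index.html",
--         "output_playlist_site/index.html",
--         "/output_playlist_site/index.html",
--     ]
--     for old in old_paths:
--         text = text.replace(f'href="{old}"', f'href="{SERVER_PLAYLIST_INDEX}"')
--         text = text.replace(f"href='{old}'", f"href='{SERVER_PLAYLIST_INDEX}'")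
--     return text
-- ===== SOURCE B (Python) =====
-- import re
--
-- SERVER_PLAYLIST_INDEX = "playlist/index.html"
--
-- _OLD_PATHS = [
--     "twerk-video-playlist.html",
--     "playlist.html",
--     "playlist/index.html",
--     "/playlist/index.html",
--     "output_playlist_site/index.html",
--     "/output_playlist_site/index.html",
-- ]
--
-- # One left-to-right pass: href=<quote><any old path><same quote>  ->  href=<quote>playlist/index.html<quote>
-- _PATTERN = re.compile(
--     'href=(["\'])(?:' + "|".join(re.escape(p) for p in _OLD_PATHS) + r")\1"
-- )
--
--
-- def patch_old_links(text: str) -> str: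
--     return _PATTERN.sub("href=\\g<1>" + SERVER_PLAYLIST_INDEX + "\\g<1>", text)
-- ===== Notes on version B (the rewrite author's own statement) =====
-- stated objective: idiomatic
-- what changed: The twelve sequential str.replace passes (6 paths x 2 quote styles) are replaced by a single compiled re.sub that scans the text once, matching href=(quote)(any old path)(same quote) via an alternation of escaped literals and a backreference for the quote.
import Mathlib
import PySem

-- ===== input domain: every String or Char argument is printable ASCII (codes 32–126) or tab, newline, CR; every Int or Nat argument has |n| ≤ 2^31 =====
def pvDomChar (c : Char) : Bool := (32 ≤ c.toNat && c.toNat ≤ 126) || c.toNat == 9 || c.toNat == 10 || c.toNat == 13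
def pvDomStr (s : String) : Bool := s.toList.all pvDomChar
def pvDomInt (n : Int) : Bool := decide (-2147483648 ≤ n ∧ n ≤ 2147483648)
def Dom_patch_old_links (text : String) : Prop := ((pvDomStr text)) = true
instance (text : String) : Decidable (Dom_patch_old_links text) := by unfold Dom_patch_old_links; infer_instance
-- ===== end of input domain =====

-- B replaces A's twelve sequential str.replace passes by one single left-to-right scan
-- (re.sub over an alternation of the literal link tokens), ported by hand; objective: idiomatic.


-- ===== PORT A =====
def SERVER_PLAYLIST_INDEX : String := "playlist/index.html"

def patch_old_links (text : String) : String :=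
  let old_paths : List String :=
    [ "twerk-video-playlist.html",
      "playlist.html",
      "playlist/index.html",
      "/playlist/index.html",
      "output_playlist_site/index.html",
      "/output_playlist_site/index.html" ]
  old_paths.foldl (fun text old =>
    let text := PySem.Str.replace text ("href=\"" ++ old ++ "\"") ("href=\"" ++ SERVER_PLAYLIST_INDEX ++ "\"")
    let text := PySem.Str.replace text ("href='" ++ old ++ "'") ("href='" ++ SERVER_PLAYLIST_INDEX ++ "'")
    text) text

-- ===== PORT B =====
-- Source B does ONE left-to-right pass with re.sub over the pattern
--   href=(["'])(?:<old path 1>|…|<old path 6>)\1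
-- replacing each match by href=<quote>playlist/index.html<quote>.  The regex engine scans
-- left to right; at each position the character class fixes the quote (deterministic), then
-- the literal alternatives are tried in list order, then the backreference demands the same
-- closing quote.  The hand port below is exact for this pattern because every alternative is
-- a literal: pvMatchAt decides whether a match starts at the current position (and which
-- path matched, first alternative wins), pvScan emits the replacement and skips the match,
-- otherwise copies one character — exactly re.sub's behaviour for a literal-alternation pattern.
def pvPaths : List (List Char) :=
  [ "twerk-video-playlist.html".toList,
    "playlist.html".toList,
    "playlist/index.html".toList,
    "/playlist/index.html".toList,
    "output_playlist_site/index.html".toList,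
    "/output_playlist_site/index.html".toList ]

-- href=<q><p><q>
def pvLinkPat (q : Char) (p : List Char) : List Char :=
  'h' :: 'r' :: 'e' :: 'f' :: '=' :: q :: (p ++ [q])

def pvRepl (q : Char) : List Char := pvLinkPat q "playlist/index.html".toList

-- does a match of the pattern start at the head of s?  returns (quote, matched path length)
def pvMatchAt (s : List Char) : Option (Char × Nat) :=
  if List.isPrefixOf ['h', 'r', 'e', 'f', '=', '"'] s then
    (pvPaths.find? (fun p => List.isPrefixOf (p ++ ['"']) (s.drop 6))).map (fun p => ('"', p.length))
  else if List.isPrefixOf ['h', 'r', 'e', 'f', '=', '\''] s then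
    (pvPaths.find? (fun p => List.isPrefixOf (p ++ ['\'']) (s.drop 6))).map (fun p => ('\'', p.length))
  else none

def pvScan : List Char → List Char
  | [] => []
  | c :: u =>
    match pvMatchAt (c :: u) with
    | some (_q, n) => pvRepl _q ++ pvScan (u.drop (n + 6))
    | none => c :: pvScan u
termination_by s => s.length
decreasing_by
  · simp only [List.length_drop, List.length_cons]; omega
  · simp

def patch_old_links_alt (text : String) : String := String.ofList (pvScan text.toList)

-- ===== PRECONDITION & SPEC =====
def Spec_patch_old_links (text : String) (out : String) : Prop := out = patch_old_links_alt text
instance (text : String) (out : String) : Decidable (Spec_patch_old_links text out) := by unfold Spec_patch_old_links; infer_instance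

-- ===== CLAIM (what is proved, stated in full; the proofs are below) =====
def Claim_equal_patch_old_links : Prop := ∀ (text : String), Dom_patch_old_links text → Spec_patch_old_links text (patch_old_links text)

-- ===== LEMMAS AND PROOFS =====

-- Recursive description of Python's str.replace (old nonempty) on char lists.
def pvReplace (old new : List Char) : List Char → List Char
  | [] => []
  | c :: t =>
    if List.isPrefixOf old (c :: t) then new ++ pvReplace old new (t.drop (old.length - 1))
    else c :: pvReplace old new t
termination_by s => s.length
decreasing_by
  · simp only [List.length_drop, List.length_cons]; omega
  · simp

theorem pvReplace_go (old new : List Char) (ho : old ≠ []) :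
    ∀ fuel l acc, l.length ≤ fuel →
      PySem.Chars.replace.go old new fuel l acc = acc.reverse ++ pvReplace old new l := by
  intro fuel
  induction fuel with
  | zero =>
    intro l acc hl
    have : l = [] := List.eq_nil_of_length_eq_zero (Nat.le_zero.mp hl)
    subst this
    simp [PySem.Chars.replace.go, pvReplace]
  | succ fuel ih =>
    intro l acc hl
    match l with
    | [] => simp [PySem.Chars.replace.go, pvReplace]
    | c :: t =>
      rw [PySem.Chars.replace.go, pvReplace]
      by_cases hp : List.isPrefixOf old (c :: t)
      · simp only [hp, if_true]
        obtain ⟨k, hk⟩ : ∃ k, old.length = k + 1 :=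
          ⟨old.length - 1, (Nat.succ_pred_eq_of_pos (List.length_pos_of_ne_nil ho)).symm⟩
        have hdrop : (c :: t).drop old.length = t.drop (old.length - 1) := by
          rw [hk]; simp
        rw [ih _ _ (by simp at hl ⊢; omega : ((c :: t).drop old.length).length ≤ fuel)]
        rw [hdrop]; simp
      · simp only [hp, Bool.false_eq_true, if_false]
        rw [ih t (c :: acc) (by simp at hl; omega)]
        simp

theorem pvReplace_eq (s old new : List Char) (ho : old ≠ []) :
    PySem.Chars.replace s old new = pvReplace old new s := by
  rw [PySem.Chars.replace]
  have : old.isEmpty = false := by simpa [List.isEmpty_iff] using ho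
  rw [this]
  simpa using pvReplace_go old new ho s.length s [] le_rfl

theorem pvReplace_match (old new x : List Char) (ho : old ≠ []) (h : old <+: x) :
    pvReplace old new x = new ++ pvReplace old new (x.drop old.length) := by
  match x with
  | [] =>
    exact absurd (List.prefix_nil.mp h) ho
  | c :: t =>
    rw [pvReplace]
    have hp : List.isPrefixOf old (c :: t) = true := List.isPrefixOf_iff_prefix.mpr h
    rw [hp, if_pos rfl]
    obtain ⟨k, hk⟩ : ∃ k, old.length = k + 1 :=
      ⟨old.length - 1, (Nat.succ_pred_eq_of_pos (List.length_pos_of_ne_nil ho)).symm⟩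
    rw [hk]; simp

theorem pvReplace_nomatch (old new : List Char) (c : Char) (t : List Char)
    (h : ¬ old <+: (c :: t)) :
    pvReplace old new (c :: t) = c :: pvReplace old new t := by
  rw [pvReplace]
  have hp : List.isPrefixOf old (c :: t) = false := by
    rw [Bool.eq_false_iff]
    intro hc
    exact h (List.isPrefixOf_iff_prefix.mp hc)
  rw [hp]; simp

theorem pvPrefix_append_split (a b s : List Char) :
    a ++ b <+: s ↔ a <+: s ∧ b <+: s.drop a.length := by
  constructor
  · rintro ⟨k, hk⟩
    constructor
    · exact ⟨b ++ k, by simpa using hk⟩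
    · refine ⟨k, ?_⟩
      rw [← hk, List.append_assoc, List.drop_left]
  · rintro ⟨⟨k1, hk1⟩, ⟨k2, hk2⟩⟩
    refine ⟨k2, ?_⟩
    rw [← hk1] at hk2 ⊢
    rw [List.drop_left] at hk2
    rw [← hk2, List.append_assoc]

abbrev pvNS (t a : List Char) : Prop :=
  ∀ q, q < a.length → ¬ (t <+: a.drop q) ∧ ¬ (a.drop q <+: t)

theorem pvNS_tail (t : List Char) (c : Char) (a : List Char) (h : pvNS t (c :: a)) : pvNS t a := by
  intro q hq
  have := h (q + 1) (by simpa using Nat.succ_lt_succ hq)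
  simpa using this

theorem pvPass (t r a : List Char) (h : pvNS t a) :
    ∀ b, pvReplace t r (a ++ b) = a ++ pvReplace t r b := by
  induction a with
  | nil => intro b; simp
  | cons c a' ih =>
    intro b
    have hno : ¬ t <+: (c :: a') ++ b := by
      intro hpre
      have h0 := h 0 (by simp)
      rcases List.prefix_or_prefix_of_prefix hpre (List.prefix_append (c :: a') b) with h1 | h1
      · exact h0.1 (by simpa using h1)
      · exact h0.2 (by simpa using h1)
    rw [List.cons_append, pvReplace_nomatch t r c (a' ++ b) (by simpa using hno)]
    rw [ih (pvNS_tail t c a' h) b]; simp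

abbrev pvNC (w r : List Char) : Prop :=
  ∀ q, q < w.length → ¬ (w.drop q <+: r) ∧ ¬ (r <+: w.drop q)

theorem pvNC_tail (c : Char) (w r : List Char) (h : pvNC (c :: w) r) : pvNC w r := by
  intro q hq
  have := h (q + 1) (by simpa using Nat.succ_lt_succ hq)
  simpa using this

theorem pvNoCreate (t r : List Char) (ht : t ≠ []) :
    ∀ n x, List.length x ≤ n → ∀ w : List Char, pvNC w r →
      w <+: pvReplace t r x → w <+: x := by
  intro n
  induction n with
  | zero =>
    intro x hx w _ hw
    have : x = [] := List.eq_nil_of_length_eq_zero (Nat.le_zero.mp hx)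
    subst this
    simpa [pvReplace] using hw
  | succ n ih =>
    intro x hx w hnc hw
    match x with
    | [] => simpa [pvReplace] using hw
    | c :: u =>
      by_cases hp : t <+: (c :: u)
      · rw [pvReplace_match t r (c :: u) ht hp] at hw
        match w with
        | [] => exact List.nil_prefix
        | d :: w' =>
          exfalso
          have h0 := hnc 0 (by simp)
          rcases List.prefix_or_prefix_of_prefix hw (List.prefix_append r _) with h1 | h1
          · exact h0.1 (by simpa using h1)
          · exact h0.2 (by simpa using h1)
      · rw [pvReplace_nomatch t r c u hp] at hw
        match w with
        | [] => exact List.nil_prefix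
        | d :: w' =>
          rw [List.cons_prefix_cons] at hw ⊢
          refine ⟨hw.1, ih u (by simpa using hx) w' (pvNC_tail d w' r hnc) hw.2⟩

-- the twelve (token, replacement) pairs, in A's replace order
def pvPairs : List (List Char × List Char) :=
  pvPaths.flatMap (fun p => [(pvLinkPat '"' p, pvRepl '"'), (pvLinkPat '\'' p, pvRepl '\'')])

def pvChain (P : List (List Char × List Char)) (s : List Char) : List Char :=
  P.foldl (fun acc pr => pvReplace pr.1 pr.2 acc) s

theorem pvChain_append (P Q : List (List Char × List Char)) (s : List Char) :
    pvChain (P ++ Q) s = pvChain Q (pvChain P s) := by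
  simp [pvChain, List.foldl_append]

theorem pvChain_cons (pr : List Char × List Char) (P : List (List Char × List Char))
    (s : List Char) : pvChain (pr :: P) s = pvChain P (pvReplace pr.1 pr.2 s) := rfl

theorem pvChain_pass (P : List (List Char × List Char)) (a : List Char)
    (h : ∀ pr ∈ P, ∀ b, pvReplace pr.1 pr.2 (a ++ b) = a ++ pvReplace pr.1 pr.2 b) :
    ∀ v, pvChain P (a ++ v) = a ++ pvChain P v := by
  induction P with
  | nil => intro v; simp [pvChain]
  | cons pr P' ih =>
    intro v
    rw [pvChain_cons, pvChain_cons, h pr (List.mem_cons_self) v]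
    exact ih (fun pr' h' b => h pr' (List.mem_cons_of_mem _ h') b) (pvReplace pr.1 pr.2 v)

theorem pvChain_tok (P1 P2 : List (List Char × List Char)) (t r : List Char)
    (hsplit : pvPairs = P1 ++ (t, r) :: P2) (ht : t ≠ []) (hr : r ≠ [])
    (h1 : ∀ pr ∈ P1, pvNS pr.1 t)
    (h2 : ∀ pr ∈ P2, pvNS pr.1 r ∨ (pr.1 = r ∧ pr.2 = r)) :
    ∀ v, pvChain pvPairs (t ++ v) = r ++ pvChain pvPairs v := by
  intro v
  have hid : ∀ (w : List Char) (b : List Char), w ≠ [] →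
      pvReplace w w (w ++ b) = w ++ pvReplace w w b := by
    intro w b hw
    rw [pvReplace_match w w (w ++ b) hw (List.prefix_append w b), List.drop_left]
  have hpass1 : ∀ pr ∈ P1, ∀ b, pvReplace pr.1 pr.2 (t ++ b) = t ++ pvReplace pr.1 pr.2 b :=
    fun pr hpr b => pvPass pr.1 pr.2 t (h1 pr hpr) b
  have hpass2 : ∀ pr ∈ P2, ∀ b, pvReplace pr.1 pr.2 (r ++ b) = r ++ pvReplace pr.1 pr.2 b := by
    intro pr hpr b
    rcases h2 pr hpr with hns | ⟨he1, he2⟩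
    · exact pvPass pr.1 pr.2 r hns b
    · rw [he1, he2]; exact hid r b hr
  rw [hsplit, pvChain_append, pvChain_cons, pvChain_append, pvChain_cons]
  rw [pvChain_pass P1 t hpass1 v]
  rw [pvReplace_match t r (t ++ pvChain P1 v) ht (List.prefix_append t _), List.drop_left]
  rw [pvChain_pass P2 r hpass2 (pvReplace t r (pvChain P1 v))]

theorem pvChain_tok_all :
    ∀ p ∈ pvPaths, ∀ q ∈ ['"', '\''], ∀ v,
      pvChain pvPairs (pvLinkPat q p ++ v) = pvRepl q ++ pvChain pvPairs v := by
  intro p hp q hq v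
  fin_cases hp <;> fin_cases hq
  · exact pvChain_tok (List.take 0 pvPairs) (List.drop 1 pvPairs) _ _ (by decide) (by decide) (by decide) (by decide) (by decide) v
  · exact pvChain_tok (List.take 1 pvPairs) (List.drop 2 pvPairs) _ _ (by decide) (by decide) (by decide) (by decide) (by decide) v
  · exact pvChain_tok (List.take 2 pvPairs) (List.drop 3 pvPairs) _ _ (by decide) (by decide) (by decide) (by decide) (by decide) v
  · exact pvChain_tok (List.take 3 pvPairs) (List.drop 4 pvPairs) _ _ (by decide) (by decide) (by decide) (by decide) (by decide) v
  · exact pvChain_tok (List.take 4 pvPairs) (List.drop 5 pvPairs) _ _ (by decide) (by decide) (by decide) (by decide) (by decide) v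
  · exact pvChain_tok (List.take 5 pvPairs) (List.drop 6 pvPairs) _ _ (by decide) (by decide) (by decide) (by decide) (by decide) v
  · exact pvChain_tok (List.take 6 pvPairs) (List.drop 7 pvPairs) _ _ (by decide) (by decide) (by decide) (by decide) (by decide) v
  · exact pvChain_tok (List.take 7 pvPairs) (List.drop 8 pvPairs) _ _ (by decide) (by decide) (by decide) (by decide) (by decide) v
  · exact pvChain_tok (List.take 8 pvPairs) (List.drop 9 pvPairs) _ _ (by decide) (by decide) (by decide) (by decide) (by decide) v
  · exact pvChain_tok (List.take 9 pvPairs) (List.drop 10 pvPairs) _ _ (by decide) (by decide) (by decide) (by decide) (by decide) v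
  · exact pvChain_tok (List.take 10 pvPairs) (List.drop 11 pvPairs) _ _ (by decide) (by decide) (by decide) (by decide) (by decide) v
  · exact pvChain_tok (List.take 11 pvPairs) (List.drop 12 pvPairs) _ _ (by decide) (by decide) (by decide) (by decide) (by decide) v

theorem pvChain_cons_gen (c : Char) :
    ∀ (P : List (List Char × List Char)),
      (∀ pr ∈ P, pr.1 ≠ []) →
      (∀ pr ∈ P, ∀ pr' ∈ P, pvNC (pr'.1.drop 1) pr.2) →
      ∀ x, (∀ pr ∈ P, ¬ (pr.1 <+: c :: x)) →
        pvChain P (c :: x) = c :: pvChain P x := by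
  intro P
  induction P with
  | nil => intro _ _ x _; simp [pvChain]
  | cons pr P' ih =>
    intro hne hnc x hno
    rw [pvChain_cons, pvReplace_nomatch pr.1 pr.2 c x (hno pr (List.mem_cons_self))]
    rw [ih (fun a ha => hne a (List.mem_cons_of_mem _ ha))
        (fun a ha b hb => hnc a (List.mem_cons_of_mem _ ha) b (List.mem_cons_of_mem _ hb))
        (pvReplace pr.1 pr.2 x) ?_]
    · rfl
    intro pr' hpr' hpre
    cases hpr1 : pr'.1 with
    | nil => exact hne pr' (List.mem_cons_of_mem _ hpr') hpr1
    | cons d w =>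
      rw [hpr1, List.cons_prefix_cons] at hpre
      obtain ⟨rfl, hw⟩ := hpre
      have hnc' : pvNC w pr.2 := by
        have := hnc pr (List.mem_cons_self) pr' (List.mem_cons_of_mem _ hpr')
        rwa [hpr1] at this
      have hwx : w <+: x :=
        pvNoCreate pr.1 pr.2 (hne pr (List.mem_cons_self)) x.length x le_rfl w hnc' hw
      exact hno pr' (List.mem_cons_of_mem _ hpr')
        (by rw [hpr1]; exact List.cons_prefix_cons.mpr ⟨rfl, hwx⟩)

theorem pvLinkPat_split (q : Char) (p s : List Char) :
    pvLinkPat q p <+: s ↔ ['h', 'r', 'e', 'f', '=', q] <+: s ∧ p ++ [q] <+: s.drop 6 := by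
  have h6 : ([ 'h', 'r', 'e', 'f', '=', q] : List Char).length = 6 := by simp
  rw [show pvLinkPat q p = ['h', 'r', 'e', 'f', '=', q] ++ (p ++ [q]) from rfl,
    pvPrefix_append_split, h6]

theorem pvMatchAt_none (s : List Char) (h : pvMatchAt s = none) :
    ∀ p ∈ pvPaths, ∀ q ∈ ['"', '\''], ¬ (pvLinkPat q p <+: s) := by
  intro p hp q hq hpre
  rw [pvLinkPat_split] at hpre
  obtain ⟨hhdr, hrest⟩ := hpre
  unfold pvMatchAt at h
  have hqd : q = '"' ∨ q = '\'' := by simpa using hq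
  split_ifs at h with h1 h2
  · have hfind := List.find?_eq_none.mp (Option.map_eq_none_iff.mp h)
    rcases hqd with rfl | rfl
    · exact hfind p hp (List.isPrefixOf_iff_prefix.mpr hrest)
    · have h1' : (['h', 'r', 'e', 'f', '=', '"'] : List Char) <+: s :=
        List.isPrefixOf_iff_prefix.mp h1
      rcases List.prefix_or_prefix_of_prefix h1' hhdr with hpp | hpp <;>
        · have := hpp.eq_of_length (by simp)
          simp at this
  · have hfind := List.find?_eq_none.mp (Option.map_eq_none_iff.mp h)
    rcases hqd with rfl | rfl
    · have h2' : (['h', 'r', 'e', 'f', '=', '\''] : List Char) <+: s :=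
        List.isPrefixOf_iff_prefix.mp h2
      rcases List.prefix_or_prefix_of_prefix h2' hhdr with hpp | hpp <;>
        · have := hpp.eq_of_length (by simp)
          simp at this
    · exact hfind p hp (List.isPrefixOf_iff_prefix.mpr hrest)
  · rcases hqd with rfl | rfl
    · exact h1 (List.isPrefixOf_iff_prefix.mpr hhdr)
    · exact h2 (List.isPrefixOf_iff_prefix.mpr hhdr)

theorem pvMatchAt_some (s : List Char) (q : Char) (n : Nat)
    (h : pvMatchAt s = some (q, n)) :
    q ∈ ['"', '\''] ∧ ∃ p ∈ pvPaths, p.length = n ∧ pvLinkPat q p <+: s := by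
  unfold pvMatchAt at h
  split_ifs at h with h1 h2
  · obtain ⟨p, hfind, heq⟩ := Option.map_eq_some_iff.mp h
    obtain ⟨hq, hn⟩ : '"' = q ∧ p.length = n := by
      constructor <;> [exact congrArg Prod.fst heq; exact congrArg Prod.snd heq]
    subst hq
    refine ⟨by simp, p, List.mem_of_find?_eq_some hfind, hn, ?_⟩
    rw [pvLinkPat_split]
    exact ⟨List.isPrefixOf_iff_prefix.mp h1,
      List.isPrefixOf_iff_prefix.mp (List.find?_eq_some_iff_append.mp hfind).1⟩
  · obtain ⟨p, hfind, heq⟩ := Option.map_eq_some_iff.mp h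
    obtain ⟨hq, hn⟩ : '\'' = q ∧ p.length = n := by
      constructor <;> [exact congrArg Prod.fst heq; exact congrArg Prod.snd heq]
    subst hq
    refine ⟨by simp, p, List.mem_of_find?_eq_some hfind, hn, ?_⟩
    rw [pvLinkPat_split]
    exact ⟨List.isPrefixOf_iff_prefix.mp h2,
      List.isPrefixOf_iff_prefix.mp (List.find?_eq_some_iff_append.mp hfind).1⟩

theorem pvReplace_nil (old new : List Char) : pvReplace old new [] = [] := by
  rw [pvReplace]

theorem pvChain_nil : ∀ P, pvChain P [] = [] := by
  intro P
  induction P with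
  | nil => rfl
  | cons pr P' ih => rw [pvChain_cons, pvReplace_nil, ih]

theorem pvScan_nil : pvScan [] = [] := by rw [pvScan]

theorem pvPairs_shape : ∀ pr ∈ pvPairs, ∃ p ∈ pvPaths, ∃ q ∈ ['"', '\''], pr.1 = pvLinkPat q p := by
  intro pr hpr
  rw [pvPairs, List.mem_flatMap] at hpr
  obtain ⟨p, hp, hmem⟩ := hpr
  simp only [List.mem_cons, List.not_mem_nil, or_false] at hmem
  rcases hmem with rfl | rfl
  · exact ⟨p, hp, '"', by simp, rfl⟩
  · exact ⟨p, hp, '\'', by simp, rfl⟩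

theorem pvMain : ∀ n (s : List Char), s.length ≤ n → pvChain pvPairs s = pvScan s := by
  intro n
  induction n with
  | zero =>
    intro s hs
    have : s = [] := List.eq_nil_of_length_eq_zero (Nat.le_zero.mp hs)
    subst this
    rw [pvChain_nil, pvScan_nil]
  | succ n ih =>
    intro s hs
    match s with
    | [] => rw [pvChain_nil, pvScan_nil]
    | c :: u =>
      cases h : pvMatchAt (c :: u) with
      | none =>
        have hscan : pvScan (c :: u) = c :: pvScan u := by rw [pvScan, h]
        have hu : u.length ≤ n := by simp at hs; omega
        rw [hscan, ← ih u hu]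
        refine pvChain_cons_gen c pvPairs (by decide) (by decide) u ?_
        intro pr hpr
        obtain ⟨p, hp, q, hq, he⟩ := pvPairs_shape pr hpr
        rw [he]
        exact pvMatchAt_none _ h p hp q hq
      | some qn =>
        obtain ⟨q, m⟩ := qn
        obtain ⟨hq, p, hp, hlen, hpre⟩ := pvMatchAt_some _ _ _ h
        obtain ⟨v, hv⟩ := hpre
        have hscan : pvScan (c :: u) = pvRepl q ++ pvScan (u.drop (m + 6)) := by rw [pvScan, h]
        have hlenpat : (pvLinkPat q p).length = m + 7 := by simp [pvLinkPat]; omega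
        have hveq : v = u.drop (m + 6) := by
          have hd := congrArg (List.drop (m + 7)) hv
          rw [← hlenpat, List.drop_left] at hd
          rw [hlenpat] at hd
          have h76 : m + 7 = (m + 6) + 1 := by omega
          rw [h76, List.drop_succ_cons] at hd
          exact hd
        have hvlen : v.length ≤ n := by
          have hL := congrArg List.length hv
          rw [List.length_append, hlenpat] at hL
          simp at hL hs
          omega
        rw [hscan, ← hveq, ← hv, pvChain_tok_all p hp q hq v, ih v hvlen]

theorem pvTok_dq (old : String) :
    ("href=\"" ++ old ++ "\"").toList = pvLinkPat '"' old.toList := by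
  simp [pvLinkPat]

theorem pvTok_sq (old : String) :
    ("href='" ++ old ++ "'").toList = pvLinkPat '\'' old.toList := by
  simp [pvLinkPat]

theorem pvRep_dq :
    ("href=\"" ++ SERVER_PLAYLIST_INDEX ++ "\"").toList = pvRepl '"' := by
  simp [pvRepl, pvLinkPat, SERVER_PLAYLIST_INDEX]

theorem pvRep_sq :
    ("href='" ++ SERVER_PLAYLIST_INDEX ++ "'").toList = pvRepl '\'' := by
  simp [pvRepl, pvLinkPat, SERVER_PLAYLIST_INDEX]

theorem pvStep (old x : String) :
    (PySem.Str.replace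
        (PySem.Str.replace x ("href=\"" ++ old ++ "\"") ("href=\"" ++ SERVER_PLAYLIST_INDEX ++ "\""))
        ("href='" ++ old ++ "'") ("href='" ++ SERVER_PLAYLIST_INDEX ++ "'")).toList
      = pvReplace (pvLinkPat '\'' old.toList) (pvRepl '\'')
          (pvReplace (pvLinkPat '"' old.toList) (pvRepl '"') x.toList) := by
  rw [PySem.Str.toList_replace, PySem.Str.toList_replace]
  rw [pvTok_dq, pvTok_sq, pvRep_dq, pvRep_sq]
  rw [pvReplace_eq _ _ _ (by simp [pvLinkPat]), pvReplace_eq _ _ _ (by simp [pvLinkPat])]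

theorem pvA_toList (text : String) :
    (patch_old_links text).toList = pvChain pvPairs text.toList := by
  simp only [patch_old_links, List.foldl_cons, List.foldl_nil]
  simp only [pvChain, pvPairs, pvPaths, List.flatMap_cons, List.flatMap_nil,
    List.append_nil, List.cons_append, List.nil_append, List.foldl_cons, List.foldl_nil]
  simp only [pvStep]

-- ===== VERDICT (by name: the statement is the Claim_ definition above) =====
theorem patch_old_links_spec : Claim_equal_patch_old_links := by
  intro text _
  unfold Spec_patch_old_links patch_old_links_alt
  apply String.toList_inj.mp
  rw [pvA_toList, pvMain text.toList.length text.toList le_rfl]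
  simp
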